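-- pv_equiv track=rewrite | github.com/gov2-ro/tempo-ins-dump | 6-fetch-csv.py | has_judete_and_localitati
-- ===== SOURCE A (Python) =====
-- from typing import Dict, List, Any, Optional
--
-- def has_judete_and_localitati(matrix_def: Dict) -> tuple[bool, Optional[Dict], Optional[Dict]]:
--     """
--     Check if matrix definition has both 'Judete' and 'Localitati' dimensions.
--
--     Args:
--         matrix_def: Matrix definition dictionary
--
--     Returns:
--         Tuple of (has_both, judete_dim, localitati_dim)
--     """
--     judete_dim = None
--     localitati_dim = None
--
--     for dim in matrix_def.get("dimensionsMap", []):
--         label = dim.get("label", "").strip().lower()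
--         if label == "judete":
--             judete_dim = dim
--         elif label in ["localitati", "localitati "]:  # Handle trailing space
--             localitati_dim = dim
--
--     has_both = judete_dim is not None and localitati_dim is not None
--     return has_both, judete_dim, localitati_dim
-- ===== SOURCE B (Python) =====
-- def has_judete_and_localitati(matrix_def):
--     """Two independent first-match searches over the reversed list (last match wins)."""
--     dims = matrix_def.get("dimensionsMap", [])
--     def norm(d):
--         return d.get("label", "").strip().lower()
--     judete_dim = next((d for d in reversed(dims) if norm(d) == "judete"), None)
--     localitati_dim = next((d for d in reversed(dims) if norm(d) == "localitati"), None)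
--     has_both = judete_dim is not None and localitati_dim is not None
--     return has_both, judete_dim, localitati_dim
-- ===== Notes on version B (the rewrite author's own statement) =====
-- stated objective: simpler
-- what changed: Replaces A's single accumulator loop with two mutable slots and an if/elif chain (including a dead 'localitati ' branch that strip() makes unreachable) by two independent first-match searches over the reversed dimension list; first match in reverse order equals A's last-wins overwrite.
import Mathlib
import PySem

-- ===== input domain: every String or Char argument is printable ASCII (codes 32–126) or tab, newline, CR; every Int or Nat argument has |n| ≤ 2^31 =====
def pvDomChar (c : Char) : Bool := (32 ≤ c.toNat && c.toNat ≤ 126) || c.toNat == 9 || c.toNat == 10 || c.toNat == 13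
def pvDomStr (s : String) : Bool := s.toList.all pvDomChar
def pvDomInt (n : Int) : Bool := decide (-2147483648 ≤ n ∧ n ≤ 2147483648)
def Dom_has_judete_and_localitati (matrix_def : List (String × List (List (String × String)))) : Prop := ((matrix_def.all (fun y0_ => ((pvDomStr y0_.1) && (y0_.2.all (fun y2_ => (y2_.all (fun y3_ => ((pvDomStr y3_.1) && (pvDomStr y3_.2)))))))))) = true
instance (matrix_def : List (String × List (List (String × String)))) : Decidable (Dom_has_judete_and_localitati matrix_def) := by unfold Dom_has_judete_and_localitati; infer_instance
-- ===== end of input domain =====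

-- B replaces A's two-slot conditional accumulator loop by two independent first-match searches on the reversed list (simpler; last match wins either way).

-- ===== PORT A =====
def has_judete_and_localitati (matrix_def : List (String × List (List (String × String)))) : Bool × (Option (List (String × String))) × (Option (List (String × String))) :=
  let dims := (PySem.Dict.mk matrix_def).getD "dimensionsMap" []
  let st := dims.foldl (fun (st : Option (List (String × String)) × Option (List (String × String))) dim =>
      let label := PySem.Str.lower (PySem.Str.strip ((PySem.Dict.mk dim).getD "label" ""))
      if label == "judete" then (some dim, st.2)
      else if label == "localitati" || label == "localitati " then (st.1, some dim)
      else st) (none, none)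
  (st.1.isSome && st.2.isSome, st.1, st.2)

-- ===== PORT B =====
-- B-side helper: the normalized label of a dimension
def pvNorm (dim : List (String × String)) : String :=
  PySem.Str.lower (PySem.Str.strip ((PySem.Dict.mk dim).getD "label" ""))

def has_judete_and_localitati_alt (matrix_def : List (String × List (List (String × String)))) : Bool × (Option (List (String × String))) × (Option (List (String × String))) :=
  let dims := (PySem.Dict.mk matrix_def).getD "dimensionsMap" []
  let judete_dim := dims.reverse.find? (fun d => pvNorm d == "judete")
  let localitati_dim := dims.reverse.find? (fun d => pvNorm d == "localitati")
  (judete_dim.isSome && localitati_dim.isSome, judete_dim, localitati_dim)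

-- ===== PRECONDITION & SPEC =====
def Spec_has_judete_and_localitati (matrix_def : List (String × List (List (String × String)))) (out : Bool × (Option (List (String × String))) × (Option (List (String × String)))) : Prop := out = has_judete_and_localitati_alt matrix_def
instance (matrix_def : List (String × List (List (String × String)))) (out : Bool × (Option (List (String × String))) × (Option (List (String × String)))) : Decidable (Spec_has_judete_and_localitati matrix_def out) := by unfold Spec_has_judete_and_localitati; infer_instance

-- ===== CLAIM (what is proved, stated in full; the proofs are below) =====
def Claim_equal_has_judete_and_localitati : Prop := ∀ (matrix_def : List (String × List (List (String × String)))), Dom_has_judete_and_localitati matrix_def → Spec_has_judete_and_localitati matrix_def (has_judete_and_localitati matrix_def)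

-- ===== LEMMAS AND PROOFS =====

-- the head of a dropWhile does not satisfy the predicate
theorem pv_head?_dropWhile {α : Type} (p : α → Bool) (l : List α) (c : α)
    (h : (l.dropWhile p).head? = some c) : p c = false := by
  induction l with
  | nil => simp [List.dropWhile] at h
  | cons x xs ih =>
    by_cases hx : p x = true
    · rw [List.dropWhile_cons_of_pos hx] at h; exact ih h
    · rw [List.dropWhile_cons_of_neg hx] at h
      simp at h; subst h; simpa using hx

-- a stripped-then-lowered string never ends in a space, so A's 'localitati ' branch can never fire
theorem pv_lower_strip_ne (s : String) :
    PySem.Str.lower (PySem.Str.strip s) ≠ "localitati " := by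
  intro h
  have h' := congrArg (fun t => t.toList.getLast?) h
  simp only [PySem.Str.lower, PySem.Str.strip, PySem.Chars.lower, PySem.Chars.strip,
    PySem.Chars.rstrip] at h'
  simp only [String.toList_ofList] at h'
  rw [List.map_reverse, List.getLast?_reverse] at h'
  rw [List.head?_map] at h'
  cases hh : (List.dropWhile PySem.Chars.isspace (PySem.Chars.lstrip s.toList).reverse).head? with
  | none => rw [hh] at h'; simp at h'
  | some c =>
    rw [hh] at h'
    have hsp : PySem.Chars.isspace c = false := pv_head?_dropWhile _ _ _ hh
    have hend : "localitati ".toList.getLast? = some ' ' := by decide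
    rw [hend] at h'
    simp only [Option.map_some, Option.some.injEq] at h'
    by_cases hu : PySem.Chars.isupper c = true
    · have hr : 65 ≤ c.toNat ∧ c.toNat ≤ 90 := by
        simpa [PySem.Chars.isupper] using hu
      have hvalid : (c.toNat + 32).isValidChar := Or.inl (by omega)
      have : (Char.ofNat (c.toNat + 32)).toNat = c.toNat + 32 := by
        rw [Char.toNat_ofNat, if_pos hvalid]
      rw [PySem.Chars.lowerChar, if_pos hu] at h'
      have h32 := congrArg Char.toNat h'
      rw [this] at h32
      simp [show (' ' : Char).toNat = 32 from rfl] at h32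
      omega
    · rw [PySem.Chars.lowerChar, if_neg hu] at h'
      subst h'
      simp [PySem.Chars.isspace] at hsp

-- the loop of A, as a named step function
def pvStepA (st : Option (List (String × String)) × Option (List (String × String))) (dim : List (String × String)) :
    Option (List (String × String)) × Option (List (String × String)) :=
  let label := PySem.Str.lower (PySem.Str.strip ((PySem.Dict.mk dim).getD "label" ""))
  if label == "judete" then (some dim, st.2)
  else if label == "localitati" || label == "localitati " then (st.1, some dim)
  else st

-- one A-step seen as a reverse-search refinement of each slot
theorem pv_stepA_eq (st : Option (List (String × String)) × Option (List (String × String)))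
    (dim : List (String × String)) :
    pvStepA st dim
      = ((([dim].find? (fun d => pvNorm d == "judete")).or st.1),
         (([dim].find? (fun d => pvNorm d == "localitati")).or st.2)) := by
  unfold pvStepA pvNorm
  simp only [List.find?]
  generalize hl : PySem.Str.lower (PySem.Str.strip ((PySem.Dict.mk dim).getD "label" "")) = label
  have h3 : label ≠ "localitati " := hl ▸ pv_lower_strip_ne _
  by_cases h1 : label = "judete"
  · simp [h1]
  · by_cases h2 : label = "localitati"
    · simp [h2]
    · rw [show (label == "judete") = false from by simp [h1],
          show (label == "localitati") = false from by simp [h2]]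
      simp [h3]

-- A's fold equals the two reverse-order first-match searches
theorem pv_foldA_eq (dims : List (List (String × String)))
    (st : Option (List (String × String)) × Option (List (String × String))) :
    dims.foldl pvStepA st
      = ((dims.reverse.find? (fun d => pvNorm d == "judete")).or st.1,
         (dims.reverse.find? (fun d => pvNorm d == "localitati")).or st.2) := by
  induction dims generalizing st with
  | nil => simp
  | cons dim rest ih =>
    simp only [List.foldl_cons, List.reverse_cons, List.find?_append]
    rw [ih (pvStepA st dim), pv_stepA_eq]
    simp [Option.or_assoc]

-- ===== VERDICT (by name: the statement is the Claim_ definition above) =====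
theorem has_judete_and_localitati_spec : Claim_equal_has_judete_and_localitati := by
  intro matrix_def _
  unfold Spec_has_judete_and_localitati has_judete_and_localitati has_judete_and_localitati_alt
  have hA : (fun (st : Option (List (String × String)) × Option (List (String × String))) dim =>
      let label := PySem.Str.lower (PySem.Str.strip ((PySem.Dict.mk dim).getD "label" ""))
      if label == "judete" then (some dim, st.2)
      else if label == "localitati" || label == "localitati " then (st.1, some dim)
      else st) = pvStepA := rfl
  simp only [hA, pv_foldA_eq, Option.or_none]
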